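-- pv_equiv track=rewrite | github.com/positivetechnologylab/Nest | code_run/4.run_nest_parallel.py | has_barrier_between_mappings
-- ===== SOURCE A (Python) =====
-- def has_barrier_between_mappings(mapping1, mapping2, coupling_map):
--     # Convert to sets for easier operations
--     set1 = set(mapping1)
--     set2 = set(mapping2)
--
--     # Build an adjacency map from the coupling map
--     adjacency = {}
--     for q1, q2 in coupling_map:
--         if q1 not in adjacency:
--             adjacency[q1] = set()
--         if q2 not in adjacency:
--             adjacency[q2] = set()
--         adjacency[q1].add(q2)
--         adjacency[q2].add(q1)
--
--     # Check if any qubit in mapping1 is directly connected to any qubit in mapping2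
--     for q1 in set1:
--         if q1 in adjacency:
--             for q2 in adjacency[q1]:
--                 if q2 in set2:
--                     # Found a direct connection
--                     return False
--
--     return True
-- ===== SOURCE B (Python) =====
-- def has_barrier_between_mappings(mapping1, mapping2, coupling_map):
--     # Single flat pass over the edges: no adjacency index needed.
--     set1 = set(mapping1)
--     set2 = set(mapping2)
--     for q1, q2 in coupling_map:
--         if (q1 in set1 and q2 in set2) or (q2 in set1 and q1 in set2):
--             return False
--     return True
-- ===== Notes on version B (the rewrite author's own statement) =====
-- stated objective: simpler
-- what changed: B drops A's adjacency-dict construction and nested neighbor scan, testing each coupling-map edge directly against the two endpoint sets in one flat pass.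
import Mathlib
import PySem

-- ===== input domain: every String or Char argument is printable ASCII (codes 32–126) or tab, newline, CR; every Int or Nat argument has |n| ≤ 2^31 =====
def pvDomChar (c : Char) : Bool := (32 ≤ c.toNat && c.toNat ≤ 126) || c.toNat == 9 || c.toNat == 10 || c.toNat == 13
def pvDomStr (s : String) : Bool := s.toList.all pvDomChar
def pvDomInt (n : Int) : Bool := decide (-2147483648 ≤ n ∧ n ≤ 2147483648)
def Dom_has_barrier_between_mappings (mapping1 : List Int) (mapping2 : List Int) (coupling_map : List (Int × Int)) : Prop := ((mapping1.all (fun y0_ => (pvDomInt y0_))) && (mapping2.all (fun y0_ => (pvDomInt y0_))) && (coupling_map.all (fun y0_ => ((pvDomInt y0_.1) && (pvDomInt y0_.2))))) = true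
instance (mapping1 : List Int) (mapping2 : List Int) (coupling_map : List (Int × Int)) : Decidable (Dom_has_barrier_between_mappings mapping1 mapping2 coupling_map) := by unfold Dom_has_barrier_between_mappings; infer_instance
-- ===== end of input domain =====

-- B drops A's adjacency-dict construction and nested neighbor scan, testing each edge directly
-- against the two endpoint sets in one flat pass (simpler).

-- ===== PORT A =====
-- one iteration of A's adjacency-building loop over coupling_map
def pvAdjStep (d : PySem.Dict Int (PySem.Set Int)) (p : Int × Int) : PySem.Dict Int (PySem.Set Int) :=
  let d1 := if d.contains p.1 then d else d.insert p.1 PySem.Set.empty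
  let d2 := if d1.contains p.2 then d1 else d1.insert p.2 PySem.Set.empty
  let d3 := d2.modify p.1 PySem.Set.empty (fun s => PySem.Set.add s p.2)
  d3.modify p.2 PySem.Set.empty (fun s => PySem.Set.add s p.1)

def has_barrier_between_mappings (mapping1 : List Int) (mapping2 : List Int) (coupling_map : List (Int × Int)) : Bool :=
  let set1 : PySem.Set Int := PySem.Set.ofList mapping1
  let set2 : PySem.Set Int := PySem.Set.ofList mapping2
  let adjacency := coupling_map.foldl pvAdjStep PySem.Dict.empty
  -- 'for q1 in set1: if q1 in adjacency: for q2 in adjacency[q1]: if q2 in set2: return False'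
  -- is an existence scan whose result is iteration-order independent: ported as any
  !(set1.any (fun q1 =>
      if adjacency.contains q1 then
        (adjacency.getD q1 PySem.Set.empty).any (fun q2 => PySem.Set.contains set2 q2)
      else false))

-- ===== PORT B =====
def has_barrier_between_mappings_alt (mapping1 : List Int) (mapping2 : List Int) (coupling_map : List (Int × Int)) : Bool :=
  let set1 : PySem.Set Int := PySem.Set.ofList mapping1
  let set2 : PySem.Set Int := PySem.Set.ofList mapping2
  !(coupling_map.any (fun p =>
      (PySem.Set.contains set1 p.1 && PySem.Set.contains set2 p.2) ||
      (PySem.Set.contains set1 p.2 && PySem.Set.contains set2 p.1)))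

-- ===== PRECONDITION & SPEC =====
def Spec_has_barrier_between_mappings (mapping1 : List Int) (mapping2 : List Int) (coupling_map : List (Int × Int)) (out : Bool) : Prop := out = has_barrier_between_mappings_alt mapping1 mapping2 coupling_map
instance (mapping1 : List Int) (mapping2 : List Int) (coupling_map : List (Int × Int)) (out : Bool) : Decidable (Spec_has_barrier_between_mappings mapping1 mapping2 coupling_map out) := by unfold Spec_has_barrier_between_mappings; infer_instance

-- ===== CLAIM (what is proved, stated in full; the proofs are below) =====
def Claim_equal_has_barrier_between_mappings : Prop := ∀ (mapping1 : List Int) (mapping2 : List Int) (coupling_map : List (Int × Int)), Dom_has_barrier_between_mappings mapping1 mapping2 coupling_map → Spec_has_barrier_between_mappings mapping1 mapping2 coupling_map (has_barrier_between_mappings mapping1 mapping2 coupling_map)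

-- ===== LEMMAS AND PROOFS =====

-- the conditional 'if q not in adjacency: adjacency[q] = set()' never changes any getD-with-∅ lookup
theorem getD_condInsert (d : PySem.Dict Int (PySem.Set Int)) (k a : Int) :
    (if d.contains k then d else d.insert k PySem.Set.empty).getD a PySem.Set.empty
      = d.getD a PySem.Set.empty := by
  by_cases h : d.contains k = true
  · simp [h]
  · rw [if_neg (by simpa using h), PySem.Dict.getD_insert]
    split_ifs with he
    · subst he; rw [PySem.Dict.getD_of_not_contains (h := by simpa using h)]
    · rfl

theorem mem_getD_pvAdjStep (d : PySem.Dict Int (PySem.Set Int)) (p : Int × Int) (a b : Int) :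
    (b ∈ (pvAdjStep d p).getD a PySem.Set.empty) ↔
      b ∈ d.getD a PySem.Set.empty ∨ p = (a, b) ∨ p = (b, a) := by
  obtain ⟨x, y⟩ := p
  simp only [pvAdjStep, PySem.Dict.getD_modify, getD_condInsert, Prod.mk.injEq]
  by_cases hay : a = y <;> by_cases hax : a = x <;>
    simp_all [PySem.Set.mem_add] <;> tauto

-- neighbor membership in the built adjacency dict = edge membership (either direction)
theorem mem_getD_foldl_adj (cm : List (Int × Int)) (d : PySem.Dict Int (PySem.Set Int)) (a b : Int) :
    (b ∈ (cm.foldl pvAdjStep d).getD a PySem.Set.empty) ↔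
      b ∈ d.getD a PySem.Set.empty ∨ (a, b) ∈ cm ∨ (b, a) ∈ cm := by
  induction cm generalizing d with
  | nil => simp
  | cons p rest ih =>
      simp only [List.foldl_cons, ih, mem_getD_pvAdjStep, List.mem_cons]
      tauto

-- ===== VERDICT (by name: the statement is the Claim_ definition above) =====
theorem has_barrier_between_mappings_spec : Claim_equal_has_barrier_between_mappings := by
  intro m1 m2 cm _
  unfold Spec_has_barrier_between_mappings has_barrier_between_mappings has_barrier_between_mappings_alt
  have key : ∀ (d : PySem.Dict Int (PySem.Set Int)) q1 (f : Int → Bool),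
      (if d.contains q1 then (d.getD q1 PySem.Set.empty).any f else false)
        = (d.getD q1 PySem.Set.empty).any f := by
    intro d q1 f
    by_cases h : d.contains q1 = true
    · simp [h]
    · rw [if_neg (by simpa using h), PySem.Dict.getD_of_not_contains (h := by simpa using h)]
      rfl
  simp only [key]
  refine congrArg (fun b => !b) ?_
  rw [Bool.eq_iff_iff]
  simp only [List.any_eq_true, mem_getD_foldl_adj, PySem.Dict.getD_empty,
    PySem.Set.contains_eq_listContains, PySem.Set.mem_ofList, List.contains_iff_mem,
    Bool.or_eq_true, Bool.and_eq_true]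
  constructor
  · rintro ⟨q1, hq1, q2, hedge, hq2⟩
    rcases hedge with h | h | h
    · simp at h
    · exact ⟨(q1, q2), h, Or.inl ⟨by simpa using hq1, by simpa using hq2⟩⟩
    · exact ⟨(q2, q1), h, Or.inr ⟨by simpa using hq1, by simpa using hq2⟩⟩
  · rintro ⟨⟨x, y⟩, hmem, ⟨hx, hy⟩ | ⟨hy, hx⟩⟩
    · exact ⟨x, by simpa using hx, y, Or.inr (Or.inl hmem), by simpa using hy⟩
    · exact ⟨y, by simpa using hy, x, Or.inr (Or.inr hmem), by simpa using hx⟩
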